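-- pv_equiv track=rewrite | github.com/IamFishR/clokai | tools/file_search.py | _auto_detect_search_type
-- ===== SOURCE A (Python) =====
-- def _auto_detect_search_type(pattern: str) -> str:
--     """
--     Auto-detect the best search type based on pattern characteristics
--     """
--     # Check for regex patterns
--     regex_indicators = ['.', '*', '+', '?', '^', '$', '[', ']', '(', ')', '|', '\\']
--     if any(indicator in pattern for indicator in regex_indicators):
--         # If it has glob-style wildcards only, use glob
--         if '*' in pattern or '?' in pattern:
--             # Check if it's only simple glob patterns (no regex metacharacters)
--             simple_glob = all(char not in pattern for char in ['.', '+', '^', '$', '[', ']', '(', ')', '|', '\\'])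
--             if simple_glob:
--                 return "glob"
--         return "regex"
--
--     # Simple text search
--     return "name"
-- ===== SOURCE B (Python) =====
-- def _auto_detect_search_type(pattern: str) -> str:
--     # One pass over the characters, two flags; flat decision at the end (simpler than A's nested membership scans).
--     has_wildcard = False
--     has_regex_meta = False
--     for ch in pattern:
--         if ch == '*' or ch == '?':
--             has_wildcard = True
--         elif ch in '.+^$[]()|\\':
--             has_regex_meta = True
--     if has_wildcard and not has_regex_meta:
--         return "glob"
--     if has_wildcard or has_regex_meta:
--         return "regex"
--     return "name"
-- ===== Notes on version B (the rewrite author's own statement) =====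
-- stated objective: simpler
-- what changed: A scans the whole pattern up to 22 times (one substring-membership test per metacharacter, in two separate lists); B makes a single pass over the characters maintaining two booleans (has_wildcard, has_regex_meta) and decides with three flat conditions.
import Mathlib
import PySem

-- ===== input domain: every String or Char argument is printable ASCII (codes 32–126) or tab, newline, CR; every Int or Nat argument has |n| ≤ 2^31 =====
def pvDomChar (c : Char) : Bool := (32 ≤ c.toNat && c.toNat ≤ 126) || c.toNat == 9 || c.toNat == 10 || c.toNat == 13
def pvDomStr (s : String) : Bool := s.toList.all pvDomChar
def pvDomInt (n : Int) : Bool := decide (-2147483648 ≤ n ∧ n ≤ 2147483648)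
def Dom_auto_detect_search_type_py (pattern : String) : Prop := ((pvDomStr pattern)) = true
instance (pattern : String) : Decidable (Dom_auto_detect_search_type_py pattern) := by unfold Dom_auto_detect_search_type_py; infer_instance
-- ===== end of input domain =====

-- B replaces A's up-to-22 substring-membership scans by one pass with two flags (objective: simpler).
-- ===== PORT A =====
def auto_detect_search_type_py (pattern : String) : String :=
  let regex_indicators : List String := [".", "*", "+", "?", "^", "$", "[", "]", "(", ")", "|", "\\"]
  if regex_indicators.any (fun indicator => PySem.Str.isIn indicator pattern) then
    if PySem.Str.isIn "*" pattern || PySem.Str.isIn "?" pattern then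
      let simple_glob := [".", "+", "^", "$", "[", "]", "(", ")", "|", "\\"].all
        (fun char => !(PySem.Str.isIn char pattern))
      if simple_glob then "glob" else "regex"
    else "regex"
  else "name"

-- ===== PORT B =====
def pvIsMetaB (ch : Char) : Bool :=
  PySem.Chars.isIn [ch] ".+^$[]()|\\".toList

def auto_detect_search_type_py_alt (pattern : String) : String :=
  let flags := pattern.toList.foldl
    (fun (st : Bool × Bool) ch =>
      if ch == '*' || ch == '?' then (true, st.2)
      else if pvIsMetaB ch then (st.1, true)
      else st)
    (false, false)
  if flags.1 && !flags.2 then "glob"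
  else if flags.1 || flags.2 then "regex"
  else "name"

-- ===== PRECONDITION & SPEC =====
def Spec_auto_detect_search_type_py (pattern : String) (out : String) : Prop := out = auto_detect_search_type_py_alt pattern
instance (pattern : String) (out : String) : Decidable (Spec_auto_detect_search_type_py pattern out) := by unfold Spec_auto_detect_search_type_py; infer_instance

-- ===== CLAIM (what is proved, stated in full; the proofs are below) =====
def Claim_equal_auto_detect_search_type_py : Prop := ∀ (pattern : String), Dom_auto_detect_search_type_py pattern → Spec_auto_detect_search_type_py pattern (auto_detect_search_type_py pattern)

-- ===== LEMMAS AND PROOFS =====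

-- ===== VERDICT (by name: the statement is the Claim_ definition above) =====
-- 'ind in pattern' for a one-character ind is character membership
theorem isIn_single_eq_any (c : Char) (s : String) :
    PySem.Str.isIn (String.ofList [c]) s = s.toList.any (· == c) := by
  rw [Bool.eq_iff_iff, PySem.Str.isIn_iff_infix]
  simp [List.singleton_infix_iff]

theorem any_or_split (l : List Char) (p q : Char → Bool) :
    l.any (fun c => p c || q c) = (l.any p || l.any q) := by
  induction l with
  | nil => rfl
  | cons x t ih => simp [List.any_cons, ih]; ac_rfl

def pvIsW (c : Char) : Bool := c == '*' || c == '?'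

-- B's fold computes the 'any wildcard' / 'any meta' flags
theorem foldl_flags (l : List Char) (a b : Bool) :
    l.foldl
      (fun (st : Bool × Bool) ch =>
        if ch == '*' || ch == '?' then (true, st.2)
        else if pvIsMetaB ch then (st.1, true)
        else st) (a, b)
    = (a || l.any pvIsW, b || l.any pvIsMetaB) := by
  induction l generalizing a b with
  | nil => simp
  | cons x t ih =>
    simp only [List.foldl_cons, List.any_cons]
    by_cases hw : (x == '*' || x == '?') = true
    · have hwv : pvIsW x = true := hw
      have hm : pvIsMetaB x = false := by
        rcases (by simpa using hw : x = '*' ∨ x = '?') with h | h <;> subst h <;> decide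
      rw [if_pos hw, ih, hwv, hm]
      simp
    · by_cases hm : pvIsMetaB x = true
      · have hwv : pvIsW x = false := by simpa [pvIsW] using hw
        rw [if_neg (by simp [hw]), if_pos hm, ih, hwv, hm]
        simp
      · have hwv : pvIsW x = false := by simpa [pvIsW] using hw
        have hmv : pvIsMetaB x = false := by simpa using hm
        rw [if_neg (by simp [hw]), if_neg (by simp [hm]), ih, hwv, hmv]
        simp

theorem pvIsMetaB_eq :
    pvIsMetaB = (fun c => c == '.' || c == '+' || c == '^' || c == '$' || c == '[' || c == ']'
      || c == '(' || c == ')' || c == '|' || c == '\\') := by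
  funext c
  rw [Bool.eq_iff_iff, pvIsMetaB, PySem.Chars.isIn_iff_infix,
    show ".+^$[]()|\\".toList = ['.', '+', '^', '$', '[', ']', '(', ')', '|', '\\'] from by decide]
  simp [List.singleton_infix_iff, List.mem_cons, or_assoc]

theorem pvIsW_eq : pvIsW = (fun c => c == '*' || c == '?') := rfl

-- ===== VERDICT (by name: the statement is the Claim_ definition above) =====
theorem auto_detect_search_type_py_spec : Claim_equal_auto_detect_search_type_py := by
  intro pattern _
  unfold Spec_auto_detect_search_type_py auto_detect_search_type_py auto_detect_search_type_py_alt
  simp only [List.any_cons, List.any_nil, List.all_cons, List.all_nil, foldl_flags,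
    Bool.or_false, Bool.false_or, Bool.and_true]
  rw [show ("." : String) = String.ofList ['.'] from rfl,
      show ("*" : String) = String.ofList ['*'] from rfl,
      show ("+" : String) = String.ofList ['+'] from rfl,
      show ("?" : String) = String.ofList ['?'] from rfl,
      show ("^" : String) = String.ofList ['^'] from rfl,
      show ("$" : String) = String.ofList ['$'] from rfl,
      show ("[" : String) = String.ofList ['['] from rfl,
      show ("]" : String) = String.ofList [']'] from rfl,
      show ("(" : String) = String.ofList ['('] from rfl,
      show (")" : String) = String.ofList [')'] from rfl,
      show ("|" : String) = String.ofList ['|'] from rfl,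
      show ("\\" : String) = String.ofList ['\\'] from rfl]
  simp only [isIn_single_eq_any, pvIsMetaB_eq, pvIsW_eq, any_or_split]
  generalize pattern.toList.any (· == '.') = b1
  generalize pattern.toList.any (· == '*') = b2
  generalize pattern.toList.any (· == '+') = b3
  generalize pattern.toList.any (· == '?') = b4
  generalize pattern.toList.any (· == '^') = b5
  generalize pattern.toList.any (· == '$') = b6
  generalize pattern.toList.any (· == '[') = b7
  generalize pattern.toList.any (· == ']') = b8
  generalize pattern.toList.any (· == '(') = b9
  generalize pattern.toList.any (· == ')') = b10
  generalize pattern.toList.any (· == '|') = b11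
  generalize pattern.toList.any (· == '\\') = b12
  revert b1 b2 b3 b4 b5 b6 b7 b8 b9 b10 b11 b12
  decide
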